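-- pv_equiv track=rewrite | github.com/PapayaSupreme/prosperity-4-team-bubulle | scripts/round1_manual.py | find_clearing_price
-- ===== SOURCE A (Python) =====
-- from typing import Dict, List, Tuple, Optional
--
-- def cumulative_buy_volume(bids: Dict[int, int], price: int) -> int:
--     return sum(vol for p, vol in bids.items() if p >= price)
--
-- def cumulative_sell_volume(asks: Dict[int, int], price: int) -> int:
--     return sum(vol for p, vol in asks.items() if p <= price)
--
-- def auction_candidates(bids: Dict[int, int], asks: Dict[int, int]) -> List[int]:
--     return sorted(set(bids.keys()) | set(asks.keys()))
--
-- def find_clearing_price(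
--     bids: Dict[int, int],
--     asks: Dict[int, int],
-- ) -> Tuple[int, int, List[Tuple[int, int, int, int]]]:
--     candidates = auction_candidates(bids, asks)
--     diagnostics = []
--
--     best_price = None
--     best_matched = -1
--
--     for price in candidates:
--         cum_bid = cumulative_buy_volume(bids, price)
--         cum_ask = cumulative_sell_volume(asks, price)
--         matched = min(cum_bid, cum_ask)
--         diagnostics.append((price, cum_bid, cum_ask, matched))
--
--         if matched > best_matched:
--             best_matched = matched
--             best_price = price
--         elif matched == best_matched and price > best_price:
--             best_price = price
--
--     return best_price, best_matched, diagnostics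
-- ===== SOURCE B (Python) =====
-- def find_clearing_price(bids, asks):
--     candidates = sorted(set(bids) | set(asks))
--     sb = sorted(bids.items())
--     sa = sorted(asks.items())
--     cum_bid = sum(v for _, v in sb)
--     cum_ask = 0
--     i = j = 0
--     diagnostics = []
--     best_price = None
--     best_matched = -1
--     for price in candidates:
--         while i < len(sb) and sb[i][0] < price:
--             cum_bid -= sb[i][1]
--             i += 1
--         while j < len(sa) and sa[j][0] <= price:
--             cum_ask += sa[j][1]
--             j += 1
--         matched = min(cum_bid, cum_ask)
--         diagnostics.append((price, cum_bid, cum_ask, matched))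
--         if matched >= best_matched:
--             best_price = price
--             best_matched = matched
--     return best_price, best_matched, diagnostics
-- ===== Notes on version B (the rewrite author's own statement) =====
-- stated objective: faster
-- what changed: A recomputes cumulative buy/sell volume by a full scan of each book for every candidate price (O(n^2)); B sorts the books once and sweeps candidates with two pointers maintaining running suffix/prefix volume sums, producing identical diagnostics and best-price selection in O(n log n).
import Mathlib
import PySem

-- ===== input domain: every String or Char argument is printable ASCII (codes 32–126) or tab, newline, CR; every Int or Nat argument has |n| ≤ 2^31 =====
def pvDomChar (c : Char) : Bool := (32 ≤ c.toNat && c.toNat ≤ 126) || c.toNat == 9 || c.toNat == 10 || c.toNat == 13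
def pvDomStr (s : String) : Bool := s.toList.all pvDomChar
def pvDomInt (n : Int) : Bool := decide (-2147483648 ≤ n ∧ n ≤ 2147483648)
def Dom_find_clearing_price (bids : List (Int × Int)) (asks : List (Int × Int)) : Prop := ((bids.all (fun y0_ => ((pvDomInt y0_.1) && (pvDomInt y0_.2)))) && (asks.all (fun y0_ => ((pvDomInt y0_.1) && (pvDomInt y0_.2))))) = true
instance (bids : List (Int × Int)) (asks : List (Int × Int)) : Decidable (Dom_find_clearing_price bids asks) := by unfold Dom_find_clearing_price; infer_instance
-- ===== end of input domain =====

-- B replaces A's per-candidate full rescans of both books by one sort of each book plus a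
-- two-pointer sweep maintaining running cumulative volumes (objective: faster, O(n log n) vs O(n^2)).

-- ===== PORT A =====
def cumulative_buy_volume (bidsD : PySem.Dict Int Int) (price : Int) : Int :=
  ((bidsD.items.filter (fun pv => decide (pv.1 ≥ price))).map (fun pv => pv.2)).sum

def cumulative_sell_volume (asksD : PySem.Dict Int Int) (price : Int) : Int :=
  ((asksD.items.filter (fun pv => decide (pv.1 ≤ price))).map (fun pv => pv.2)).sum

def auction_candidates (bidsD asksD : PySem.Dict Int Int) : List Int :=
  PySem.List.sorted (PySem.Set.ofList (bidsD.keys ++ asksD.keys)) (fun x => x) false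

-- the body of A's 'for price in candidates' loop
def find_clearing_price_step (bidsD asksD : PySem.Dict Int Int)
    (st : Option Int × Int × List (Int × Int × Int × Int)) (price : Int) :
    Option Int × Int × List (Int × Int × Int × Int) :=
  let cum_bid := cumulative_buy_volume bidsD price
  let cum_ask := cumulative_sell_volume asksD price
  let matched := min cum_bid cum_ask
  let diags := st.2.2 ++ [(price, cum_bid, cum_ask, matched)]
  if matched > st.2.1 then (some price, matched, diags)
  else if matched = st.2.1 then
    match st.1 with
    | some bp => if price > bp then (some price, st.2.1, diags) else (st.1, st.2.1, diags)
    | none => (st.1, st.2.1, diags)  -- Python raises TypeError here ('price > None'); Pre_ excludes these inputs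
  else (st.1, st.2.1, diags)

def find_clearing_price (bids : List (Int × Int)) (asks : List (Int × Int)) :
    Option Int × Int × (List (Int × Int × Int × Int)) :=
  let bidsD := PySem.Dict.ofList bids
  let asksD := PySem.Dict.ofList asks
  (auction_candidates bidsD asksD).foldl (find_clearing_price_step bidsD asksD) (none, -1, [])

-- ===== PORT B =====
def altSumVols (l : List (Int × Int)) : Int := (l.map (fun pv => pv.2)).sum

-- 'while i < len(sb) and sb[i][0] < price: cum_bid -= sb[i][1]; i += 1' (pointer advance = dropping the consumed front)
def altDropSub : List (Int × Int) → Int → Int → List (Int × Int) × Int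
  | [], _, cum => ([], cum)
  | (k, v) :: t, price, cum => if k < price then altDropSub t price (cum - v) else ((k, v) :: t, cum)

-- 'while j < len(sa) and sa[j][0] <= price: cum_ask += sa[j][1]; j += 1'
def altTakeAdd : List (Int × Int) → Int → Int → List (Int × Int) × Int
  | [], _, cum => ([], cum)
  | (k, v) :: t, price, cum => if k ≤ price then altTakeAdd t price (cum + v) else ((k, v) :: t, cum)

-- 'for price in candidates: …' of B
def altLoop : List Int → List (Int × Int) → Int → List (Int × Int) → Int →
    Option Int × Int × List (Int × Int × Int × Int) → Option Int × Int × List (Int × Int × Int × Int)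
  | [], _, _, _, _, st => st
  | price :: rest, sb, cum_bid0, sa, cum_ask0, st =>
    let p1 := altDropSub sb price cum_bid0
    let p2 := altTakeAdd sa price cum_ask0
    let matched := min p1.2 p2.2
    let diags := st.2.2 ++ [(price, p1.2, p2.2, matched)]
    if matched ≥ st.2.1 then altLoop rest p1.1 p1.2 p2.1 p2.2 (some price, matched, diags)
    else altLoop rest p1.1 p1.2 p2.1 p2.2 (st.1, st.2.1, diags)

def find_clearing_price_alt (bids : List (Int × Int)) (asks : List (Int × Int)) :
    Option Int × Int × (List (Int × Int × Int × Int)) :=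
  let bidsD := PySem.Dict.ofList bids
  let asksD := PySem.Dict.ofList asks
  let candidates := PySem.List.sorted (PySem.Set.ofList (bidsD.keys ++ asksD.keys)) (fun x => x) false
  -- sorted(bids.items()): keys are distinct, so lexicographic tuple sort = stable sort by key (exact)
  let sb := PySem.List.sorted bidsD.items (fun pv => pv.1) false
  let sa := PySem.List.sorted asksD.items (fun pv => pv.1) false
  altLoop candidates sb (altSumVols sb) sa 0 (none, -1, [])

-- ===== PRECONDITION & SPEC =====
-- spec-level copies (closed-form, independent of the ports): candidate prices and the matched volume at a price
def pvCands (bids asks : List (Int × Int)) : List Int :=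
  PySem.List.sorted (PySem.Set.ofList ((PySem.Dict.ofList bids).keys ++ (PySem.Dict.ofList asks).keys)) (fun x => x) false

def pvMatched (bids asks : List (Int × Int)) (p : Int) : Int :=
  min ((((PySem.Dict.ofList bids).items.filter (fun pv => decide (pv.1 ≥ p))).map (fun pv => pv.2)).sum)
      ((((PySem.Dict.ofList asks).items.filter (fun pv => decide (pv.1 ≤ p))).map (fun pv => pv.2)).sum)

-- Pre_ excludes exactly the inputs on which A raises TypeError (comparing 'price > None'): those (only reachable
-- with negative volumes) where some candidate has matched volume -1 and every earlier candidate has matched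
-- volume ≤ -1; A returns normally on every other input, so Pre_ excludes nothing A returns on.
def Pre_find_clearing_price (bids : List (Int × Int)) (asks : List (Int × Int)) : Prop :=
  ∀ p ∈ pvCands bids asks, pvMatched bids asks p = -1 →
    ∃ q ∈ pvCands bids asks, q < p ∧ pvMatched bids asks q > -1
instance (bids : List (Int × Int)) (asks : List (Int × Int)) : Decidable (Pre_find_clearing_price bids asks) := by unfold Pre_find_clearing_price; infer_instance

def pvWitness_find_clearing_price : (List (Int × Int)) × (List (Int × Int)) := ([(10, 5)], [(9, 3)])

def Spec_find_clearing_price (bids : List (Int × Int)) (asks : List (Int × Int)) (out : Option Int × Int × (List (Int × Int × Int × Int))) : Prop := out = find_clearing_price_alt bids asks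
instance (bids : List (Int × Int)) (asks : List (Int × Int)) (out : Option Int × Int × (List (Int × Int × Int × Int))) : Decidable (Spec_find_clearing_price bids asks out) := by unfold Spec_find_clearing_price; infer_instance

-- ===== CLAIM (what is proved, stated in full; the proofs are below) =====
def Claim_equal_find_clearing_price : Prop := ∀ (bids : List (Int × Int)) (asks : List (Int × Int)), Dom_find_clearing_price bids asks → Pre_find_clearing_price bids asks → Spec_find_clearing_price bids asks (find_clearing_price bids asks)

-- ===== LEMMAS AND PROOFS =====

theorem altDropSub_spec (l : List (Int × Int)) (p cum : Int) :
    altDropSub l p cum =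
      (l.dropWhile (fun pv => decide (pv.1 < p)),
       cum - altSumVols (l.takeWhile (fun pv => decide (pv.1 < p)))) := by
  induction l generalizing cum with
  | nil => simp [altDropSub, altSumVols]
  | cons h t ih =>
    obtain ⟨k, v⟩ := h
    by_cases hk : k < p
    · simp only [altDropSub, if_pos hk, ih, List.dropWhile_cons, List.takeWhile_cons,
        decide_eq_true hk, altSumVols]
      refine Prod.ext rfl ?_
      simp; ring
    · simp [altDropSub, hk, altSumVols]

theorem altTakeAdd_spec (l : List (Int × Int)) (p cum : Int) :
    altTakeAdd l p cum =
      (l.dropWhile (fun pv => decide (pv.1 ≤ p)),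
       cum + altSumVols (l.takeWhile (fun pv => decide (pv.1 ≤ p)))) := by
  induction l generalizing cum with
  | nil => simp [altTakeAdd, altSumVols]
  | cons h t ih =>
    obtain ⟨k, v⟩ := h
    by_cases hk : k ≤ p
    · simp only [altTakeAdd, if_pos hk, ih, List.dropWhile_cons, List.takeWhile_cons,
        decide_eq_true hk, altSumVols]
      refine Prod.ext rfl ?_
      simp; ring
    · simp [altTakeAdd, hk, altSumVols]

theorem dropWhile_lt_eq_filter (l : List (Int × Int)) (p : Int)
    (h : l.Pairwise (fun x y => x.1 ≤ y.1)) :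
    l.dropWhile (fun pv => decide (pv.1 < p)) = l.filter (fun pv => decide (pv.1 ≥ p)) := by
  induction l with
  | nil => simp
  | cons a t ih =>
    rw [List.pairwise_cons] at h
    by_cases hk : a.1 < p
    · have h2 : ¬ (a.1 ≥ p) := by omega
      simp [List.dropWhile_cons, List.filter_cons, hk, h2, ih h.2]
    · have hge : a.1 ≥ p := by omega
      simp only [List.dropWhile_cons, decide_eq_false hk, Bool.false_eq_true, if_false,
        List.filter_cons, decide_eq_true hge, if_true]
      rw [List.filter_eq_self.mpr]
      intro x hx
      have := h.1 x hx
      simp; omega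

theorem takeWhile_le_eq_filter (l : List (Int × Int)) (p : Int)
    (h : l.Pairwise (fun x y => x.1 ≤ y.1)) :
    l.takeWhile (fun pv => decide (pv.1 ≤ p)) = l.filter (fun pv => decide (pv.1 ≤ p)) := by
  induction l with
  | nil => simp
  | cons a t ih =>
    rw [List.pairwise_cons] at h
    by_cases hk : a.1 ≤ p
    · simp [List.takeWhile_cons, List.filter_cons, hk, ih h.2]
    · simp only [List.takeWhile_cons, decide_eq_false hk, Bool.false_eq_true, if_false,
        List.filter_cons]
      rw [eq_comm, List.filter_eq_nil_iff]
      intro x hx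
      have := h.1 x hx
      simp; omega

theorem dropWhile_le_eq_filter (l : List (Int × Int)) (p : Int)
    (h : l.Pairwise (fun x y => x.1 ≤ y.1)) :
    l.dropWhile (fun pv => decide (pv.1 ≤ p)) = l.filter (fun pv => decide (p < pv.1)) := by
  induction l with
  | nil => simp
  | cons a t ih =>
    rw [List.pairwise_cons] at h
    by_cases hk : a.1 ≤ p
    · have h2 : ¬ (p < a.1) := by omega
      simp [List.dropWhile_cons, List.filter_cons, hk, h2, ih h.2]
    · have hgt : p < a.1 := by omega
      simp only [List.dropWhile_cons, decide_eq_false hk, Bool.false_eq_true, if_false,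
        List.filter_cons, decide_eq_true hgt, if_true]
      rw [List.filter_eq_self.mpr]
      intro x hx
      have := h.1 x hx
      simp; omega

theorem sumVols_takeWhile_dropWhile (l : List (Int × Int)) (q : Int × Int → Bool) :
    altSumVols (l.takeWhile q) + altSumVols (l.dropWhile q) = altSumVols l := by
  have h : l = l.takeWhile q ++ l.dropWhile q := (List.takeWhile_append_dropWhile).symm
  conv_rhs => rw [h]
  simp only [altSumVols, List.map_append, List.sum_append]

theorem sumVols_filter_split (l : List (Int × Int)) (p p' : Int) (h : p < p') :
    altSumVols (l.filter (fun pv => decide (pv.1 ≤ p'))) =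
      altSumVols (l.filter (fun pv => decide (pv.1 ≤ p))) +
      altSumVols ((l.filter (fun pv => decide (p < pv.1))).filter (fun pv => decide (pv.1 ≤ p'))) := by
  induction l with
  | nil => simp [altSumVols]
  | cons a t ih =>
    by_cases h1 : a.1 ≤ p
    · have h2 : a.1 ≤ p' := by omega
      have h3 : ¬ (p < a.1) := by omega
      simp only [List.filter_cons, decide_eq_true h1, decide_eq_true h2, decide_eq_false h3,
        Bool.false_eq_true, if_true, if_false, altSumVols, List.map_cons, List.sum_cons] at *
      omega
    · by_cases h2 : a.1 ≤ p'
      · have h3 : p < a.1 := by omega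
        simp only [List.filter_cons, decide_eq_true h2, decide_eq_false h1, decide_eq_true h3,
          Bool.false_eq_true, if_true, if_false, altSumVols, List.map_cons, List.sum_cons] at *
        omega
      · have h3 : p < a.1 := by omega
        simp only [List.filter_cons, decide_eq_false h2, decide_eq_false h1, decide_eq_true h3,
          Bool.false_eq_true, if_true, if_false, altSumVols, List.map_cons, List.sum_cons] at *
        omega

theorem altLoop_cons (price : Int) (rest : List Int) (sb : List (Int × Int)) (cb : Int)
    (sa : List (Int × Int)) (ca : Int) (st : Option Int × Int × List (Int × Int × Int × Int)) :
    altLoop (price :: rest) sb cb sa ca st =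
      (if min (altDropSub sb price cb).2 (altTakeAdd sa price ca).2 ≥ st.2.1 then
        altLoop rest (altDropSub sb price cb).1 (altDropSub sb price cb).2
          (altTakeAdd sa price ca).1 (altTakeAdd sa price ca).2
          (some price, min (altDropSub sb price cb).2 (altTakeAdd sa price ca).2,
            st.2.2 ++ [(price, (altDropSub sb price cb).2, (altTakeAdd sa price ca).2,
              min (altDropSub sb price cb).2 (altTakeAdd sa price ca).2)])
      else
        altLoop rest (altDropSub sb price cb).1 (altDropSub sb price cb).2
          (altTakeAdd sa price ca).1 (altTakeAdd sa price ca).2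
          (st.1, st.2.1, st.2.2 ++ [(price, (altDropSub sb price cb).2, (altTakeAdd sa price ca).2,
            min (altDropSub sb price cb).2 (altTakeAdd sa price ca).2)])) := rfl

theorem main_loop_eq (bidsD asksD : PySem.Dict Int Int)
    (cs : List Int) (sb sa : List (Int × Int)) (cb ca : Int)
    (bp : Option Int) (bm : Int) (dg : List (Int × Int × Int × Int))
    (hcs : cs.Pairwise (· < ·))
    (hsb : sb.Pairwise (fun x y => x.1 ≤ y.1))
    (hsa : sa.Pairwise (fun x y => x.1 ≤ y.1))
    (hcb : cb = altSumVols sb)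
    (hCB : ∀ p ∈ cs, cumulative_buy_volume bidsD p = altSumVols (sb.filter (fun pv => decide (pv.1 ≥ p))))
    (hCA : ∀ p ∈ cs, cumulative_sell_volume asksD p = ca + altSumVols (sa.filter (fun pv => decide (pv.1 ≤ p))))
    (hnone : bp = none → bm = -1)
    (hsafe : bp = none → ∀ p ∈ cs, min (cumulative_buy_volume bidsD p) (cumulative_sell_volume asksD p) = -1 →
      ∃ q ∈ cs, q < p ∧ min (cumulative_buy_volume bidsD q) (cumulative_sell_volume asksD q) > -1)
    (hsome : ∀ x, bp = some x → ∀ p ∈ cs, x < p) :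
    altLoop cs sb cb sa ca (bp, bm, dg) = cs.foldl (find_clearing_price_step bidsD asksD) (bp, bm, dg) := by
  induction cs generalizing sb sa cb ca bp bm dg with
  | nil => simp [altLoop]
  | cons p rest ih =>
    obtain ⟨hhead, hcs'⟩ := List.pairwise_cons.mp hcs
    have hmem : p ∈ p :: rest := List.mem_cons_self
    -- the two pointer advances compute exactly A's cumulative volumes
    have hdw := dropWhile_lt_eq_filter sb p hsb
    have e1 : altDropSub sb p cb = (sb.filter (fun pv => decide (pv.1 ≥ p)), cumulative_buy_volume bidsD p) := by
      rw [altDropSub_spec]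
      refine congrArg₂ Prod.mk hdw ?_
      have hsplit := sumVols_takeWhile_dropWhile sb (fun pv => decide (pv.1 < p))
      rw [hdw] at hsplit
      rw [hCB p hmem]
      omega
    have hdw2 := dropWhile_le_eq_filter sa p hsa
    have htw := takeWhile_le_eq_filter sa p hsa
    have e2 : altTakeAdd sa p ca = (sa.filter (fun pv => decide (p < pv.1)), cumulative_sell_volume asksD p) := by
      rw [altTakeAdd_spec]
      refine congrArg₂ Prod.mk hdw2 ?_
      rw [hCA p hmem, htw]
    set CBp := cumulative_buy_volume bidsD p with hCBp
    set CAp := cumulative_sell_volume asksD p with hCAp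
    set m := min CBp CAp with hm
    -- invariants for the tail
    have hsb' : (sb.filter (fun pv => decide (pv.1 ≥ p))).Pairwise (fun x y => x.1 ≤ y.1) :=
      hsb.filter _
    have hsa' : (sa.filter (fun pv => decide (p < pv.1))).Pairwise (fun x y => x.1 ≤ y.1) :=
      hsa.filter _
    have hcb' : CBp = altSumVols (sb.filter (fun pv => decide (pv.1 ≥ p))) := hCB p hmem
    have hCB' : ∀ p' ∈ rest, cumulative_buy_volume bidsD p' =
        altSumVols ((sb.filter (fun pv => decide (pv.1 ≥ p))).filter (fun pv => decide (pv.1 ≥ p'))) := by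
      intro p' hp'
      rw [hCB p' (List.mem_cons_of_mem _ hp'), List.filter_filter]
      congr 1
      apply List.filter_congr
      intro x hx
      have hpp' : p < p' := hhead p' hp'
      by_cases hc : p' ≤ x.1
      · have : p ≤ x.1 := by omega
        simp [hc, this]
      · simp [hc]
    have hCA' : ∀ p' ∈ rest, cumulative_sell_volume asksD p' =
        CAp + altSumVols ((sa.filter (fun pv => decide (p < pv.1))).filter (fun pv => decide (pv.1 ≤ p'))) := by
      intro p' hp'
      have hpp' : p < p' := hhead p' hp'
      have h1 := hCA p' (List.mem_cons_of_mem _ hp')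
      have h2 := hCA p hmem
      have h3 := sumVols_filter_split sa p p' hpp'
      rw [h1, hCAp, h2]
      omega
    -- evaluate one step of B's loop and of A's loop
    rw [List.foldl_cons, altLoop_cons, e1, e2]
    dsimp only
    rw [← hm]
    cases bp with
    | none =>
      have estep : find_clearing_price_step bidsD asksD (none, bm, dg) p =
          (if m > bm then (some p, m, dg ++ [(p, CBp, CAp, m)])
           else if m = bm then (none, bm, dg ++ [(p, CBp, CAp, m)])
           else (none, bm, dg ++ [(p, CBp, CAp, m)])) := rfl
      rw [estep]
      by_cases hgt : m > bm
      · rw [if_pos (le_of_lt hgt), if_pos hgt]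
        apply ih _ _ _ _ _ _ _ hcs' hsb' hsa' hcb' hCB' hCA'
        · intro h; exact nomatch h
        · intro h; exact nomatch h
        · intro y hy p' hp'
          cases Option.some.inj hy
          exact hhead p' hp'
      · by_cases heq : m = bm
        · exfalso
          have hbm := hnone rfl
          obtain ⟨q, hq, hqlt, hqgt⟩ := hsafe rfl p hmem (by omega)
          rcases List.mem_cons.mp hq with h | h
          · subst h; omega
          · exact absurd (hhead q h) (by omega)
        · have hng : ¬ m ≥ bm := by omega
          rw [if_neg hng, if_neg hgt, if_neg heq]
          apply ih _ _ _ _ _ _ _ hcs' hsb' hsa' hcb' hCB' hCA' hnone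
          · intro hbp p' hp' hmp'
            obtain ⟨q, hq, hqlt, hqgt⟩ := hsafe hbp p' (List.mem_cons_of_mem _ hp') hmp'
            rcases List.mem_cons.mp hq with h | h
            · subst h
              have hbm := hnone hbp
              omega
            · exact ⟨q, h, hqlt, hqgt⟩
          · intro y hy p' hp'
            exact nomatch hy
    | some x =>
      have estep : find_clearing_price_step bidsD asksD (some x, bm, dg) p =
          (if m > bm then (some p, m, dg ++ [(p, CBp, CAp, m)])
           else if m = bm then
             (if p > x then (some p, bm, dg ++ [(p, CBp, CAp, m)])
              else (some x, bm, dg ++ [(p, CBp, CAp, m)]))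
           else (some x, bm, dg ++ [(p, CBp, CAp, m)])) := rfl
      rw [estep]
      by_cases hgt : m > bm
      · rw [if_pos (le_of_lt hgt), if_pos hgt]
        apply ih _ _ _ _ _ _ _ hcs' hsb' hsa' hcb' hCB' hCA'
        · intro h; exact nomatch h
        · intro h; exact nomatch h
        · intro y hy p' hp'
          cases Option.some.inj hy
          exact hhead p' hp'
      · by_cases heq : m = bm
        · have hx : p > x := hsome x rfl p hmem
          rw [if_pos (ge_of_eq heq), if_neg hgt, if_pos heq, if_pos hx]
          rw [show bm = m from heq.symm]
          apply ih _ _ _ _ _ _ _ hcs' hsb' hsa' hcb' hCB' hCA'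
          · intro h; exact nomatch h
          · intro h; exact nomatch h
          · intro y hy p' hp'
            cases Option.some.inj hy
            exact hhead p' hp'
        · have hng : ¬ m ≥ bm := by omega
          rw [if_neg hng, if_neg hgt, if_neg heq]
          apply ih _ _ _ _ _ _ _ hcs' hsb' hsa' hcb' hCB' hCA' hnone
          · intro hbp p' hp' hmp'
            exact nomatch hbp
          · intro y hy p' hp'
            exact hsome y hy p' (List.mem_cons_of_mem _ hp')

theorem sumVols_sorted_filter (d : PySem.Dict Int Int) (q : Int × Int → Bool) :
    altSumVols ((PySem.List.sorted d.items (fun pv => pv.1) false).filter q) =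
      ((d.items.filter q).map (fun pv => pv.2)).sum :=
  List.Perm.sum_eq (List.Perm.map _ (List.Perm.filter _ (PySem.List.sorted_perm _ _ _)))


theorem find_clearing_price_spec' (bids asks : List (Int × Int))
    (hpre : Pre_find_clearing_price bids asks) :
    find_clearing_price bids asks = find_clearing_price_alt bids asks := by
  unfold find_clearing_price find_clearing_price_alt
  refine (main_loop_eq (PySem.Dict.ofList bids) (PySem.Dict.ofList asks) _ _ _ _ _ _ _ _
    ?_ ?_ ?_ rfl ?_ ?_ (fun _ => rfl) ?_ ?_).symm
  · exact PySem.List.sorted_ofList_pairwise_lt _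
  · exact PySem.List.sorted_pairwise _ _
  · exact PySem.List.sorted_pairwise _ _
  · intro p _
    exact (sumVols_sorted_filter (PySem.Dict.ofList bids) _).symm
  · intro p _
    rw [zero_add]
    exact (sumVols_sorted_filter (PySem.Dict.ofList asks) _).symm
  · intro _ p hp hm
    exact hpre p hp hm
  · intro x hx
    exact absurd hx (by simp)

-- ===== VERDICT (by name: the statement is the Claim_ definition above) =====
theorem find_clearing_price_spec : Claim_equal_find_clearing_price := by
  intro bids asks _ hpre
  exact find_clearing_price_spec' bids asks hpre
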